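-- pv_equiv track=rewrite | github.com/sunshower1127/Challenges-in-Programmers | 유형별-정리/집합/20.py | solution
-- ===== SOURCE A (Python) =====
-- from collections import Counter, defaultdict
--
-- def dict_diff(dict_a, dict_b):
--     keys = {*dict_a.keys()} | {*dict_b.keys()}
--
--     dict_c = {}
--     for key in keys:
--         value = dict_a.get(key, 0) - dict_b.get(key, 0)
--         if value != 0:
--             dict_c[key] = value
--
--     return dict_c
--
-- def update_dict_value(dic, key, v):
--     dic[key] += v
--     if dic[key] == 0:
--         del dic[key]
--
-- def solution(want, number, discount):
--     result = 0
--     items_to_buy = []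
--     for name, num in zip(want, number):
--         items_to_buy += [name] * num
--
--     wanted_counter = Counter(items_to_buy)
--
--     discount_counter = Counter(discount[:10])
--
--     missing = dict_diff(discount_counter, wanted_counter)
--     missing = defaultdict(int, missing)
--
--     if not missing:
--         result += 1
--
--     for i in range(1, len(discount) - 10 + 1):
--         old_one = discount[i - 1]
--         new_one = discount[i + 9]
--
--         update_dict_value(missing, old_one, -1)
--         update_dict_value(missing, new_one, 1)
--
--         if not missing:
--             result += 1
--
--     return result
-- ===== SOURCE B (Python) =====
-- from collections import Counter
--
-- def solution(want, number, discount):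
--     wanted = Counter()
--     for name, num in zip(want, number):
--         if num > 0:
--             wanted[name] += num
--     count = 1 if Counter(discount[:10]) == wanted else 0
--     for i in range(1, len(discount) - 9):
--         if Counter(discount[i:i+10]) == wanted:
--             count += 1
--     return count
-- ===== Notes on version B (the rewrite author's own statement) =====
-- stated objective: simpler
-- what changed: Replaces the incremental missing-diff dict (dict_diff + defaultdict updates per window) by recomputing each window's Counter from scratch and comparing it to the wanted Counter, which is built by summing counts instead of expanding [name]*num into a list.
import Mathlib
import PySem

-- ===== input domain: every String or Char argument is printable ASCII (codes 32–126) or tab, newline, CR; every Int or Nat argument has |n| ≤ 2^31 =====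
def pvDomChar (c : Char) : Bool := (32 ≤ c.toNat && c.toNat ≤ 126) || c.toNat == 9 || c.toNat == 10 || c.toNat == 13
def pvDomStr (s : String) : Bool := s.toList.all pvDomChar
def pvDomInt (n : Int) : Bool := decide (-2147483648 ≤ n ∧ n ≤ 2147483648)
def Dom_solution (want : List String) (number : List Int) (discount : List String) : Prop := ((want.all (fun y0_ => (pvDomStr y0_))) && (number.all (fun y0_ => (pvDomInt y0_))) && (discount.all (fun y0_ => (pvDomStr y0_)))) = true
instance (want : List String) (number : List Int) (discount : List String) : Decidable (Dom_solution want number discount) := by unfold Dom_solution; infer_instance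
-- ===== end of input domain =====

-- B replaces A's incrementally-maintained "missing" diff dict by recomputing each
-- window's Counter from scratch and comparing it to the wanted Counter (objective: simpler).

-- ===== PORT A =====
-- dict_diff: the Python iterates a hash set; the result dict is consumed only through
-- lookups/emptiness, which are iteration-order independent, so a fixed fold order is exact.
def dictDiff (a b : PySem.Dict String Int) : PySem.Dict String Int :=
  let keys := PySem.Set.union (PySem.Set.ofList a.keys) b.keys
  keys.foldl (fun c key =>
    let v := a.getD key 0 - b.getD key 0
    if v ≠ 0 then c.insert key v else c) PySem.Dict.empty

def updateDictValue (d : PySem.Dict String Int) (key : String) (v : Int) : PySem.Dict String Int :=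
  let d' := d.modify key 0 (· + v)
  if d'.getD key 0 = 0 then d'.erase key else d'

def solution (want : List String) (number : List Int) (discount : List String) : Int :=
  let itemsToBuy := (want.zip number).foldl
    (fun acc p => acc ++ List.replicate p.2.toNat p.1) []  -- [name] * num ([] for num ≤ 0)
  let wantedCounter := PySem.Dict.counter itemsToBuy
  let discountCounter := PySem.Dict.counter (PySem.List.slice discount none (some 10))
  let missing := dictDiff discountCounter wantedCounter
  let result : Int := if missing.size = 0 then 0 + 1 else 0
  ((PySem.List.pyRange 1 (PySem.List.len discount - 10 + 1) 1).foldl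
    (fun (st : Int × PySem.Dict String Int) i =>
      let oldOne := PySem.List.pyGetD discount (i - 1) ""
      let newOne := PySem.List.pyGetD discount (i + 9) ""
      let m := updateDictValue (updateDictValue st.2 oldOne (-1)) newOne 1
      (if m.size = 0 then st.1 + 1 else st.1, m))
    (result, missing)).1

-- ===== PORT B =====
-- Counter == Counter (Python ≥3.10 semantics: every key of either side has equal counts)
def counterEq (d1 d2 : PySem.Dict String Int) : Bool :=
  d1.keys.all (fun k => d1.getD k 0 == d2.getD k 0) &&
  d2.keys.all (fun k => d1.getD k 0 == d2.getD k 0)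

def solution_alt (want : List String) (number : List Int) (discount : List String) : Int :=
  let wanted := (want.zip number).foldl
    (fun d p => if p.2 > 0 then d.modify p.1 0 (· + p.2) else d) PySem.Dict.empty
  let count : Int :=
    if counterEq (PySem.Dict.counter (PySem.List.slice discount none (some 10))) wanted then 1 else 0
  (PySem.List.pyRange 1 (PySem.List.len discount - 9) 1).foldl
    (fun c i =>
      if counterEq (PySem.Dict.counter (PySem.List.slice discount (some i) (some (i + 10)))) wanted
      then c + 1 else c) count

-- ===== PRECONDITION & SPEC =====
def Spec_solution (want : List String) (number : List Int) (discount : List String) (out : Int) : Prop := out = solution_alt want number discount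
instance (want : List String) (number : List Int) (discount : List String) (out : Int) : Decidable (Spec_solution want number discount out) := by unfold Spec_solution; infer_instance

-- ===== CLAIM (what is proved, stated in full; the proofs are below) =====
def Claim_equal_solution : Prop := ∀ (want : List String) (number : List Int) (discount : List String), Dom_solution want number discount → Spec_solution want number discount (solution want number discount)

-- ===== LEMMAS AND PROOFS =====

-- the multiset of wanted items, as a count function
def wantedF (want : List String) (number : List Int) (k : String) : Int :=
  ((want.zip number).map (fun p => if p.1 = k ∧ 0 < p.2 then p.2 else 0)).sum

-- the 10-day window starting at day i
def win (discount : List String) (i : Nat) : List String := (discount.drop i).take 10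

-- invariant of A's "missing" dict after processing window i
def Good (discount : List String) (W : String → Int) (m : PySem.Dict String Int) (i : Nat) : Prop :=
  (∀ k, m.getD k 0 = ((win discount i).count k : Int) - W k) ∧
  (∀ k ∈ m.keys, m.getD k 0 ≠ 0) ∧ m.keys.Nodup

lemma countItems (l : List (String × Int)) (k : String) :
    ((l.flatMap (fun p => List.replicate p.2.toNat p.1)).count k : Int)
      = (l.map (fun p => if p.1 = k ∧ 0 < p.2 then p.2 else 0)).sum := by
  induction l with
  | nil => simp
  | cons p l ih =>
    simp only [List.flatMap_cons, List.count_append, List.map_cons, List.sum_cons]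
    push_cast
    rw [ih]
    have hrep : (((List.replicate p.2.toNat p.1).count k : Nat) : Int)
        = if p.1 = k ∧ 0 < p.2 then p.2 else 0 := by
      rw [List.count_replicate]
      by_cases h1 : p.1 = k <;> by_cases h2 : 0 < p.2 <;>
        simp [h1, h2] <;> omega
    rw [hrep]

lemma wantedA_getD (want : List String) (number : List Int) (k : String) :
    (PySem.Dict.counter ((want.zip number).foldl
        (fun acc p => acc ++ List.replicate p.2.toNat p.1) [])).getD k 0
      = wantedF want number k := by
  rw [PySem.List.foldl_append_eq_flatMap]
  simp only [List.nil_append]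
  rw [PySem.Dict.getD_counter]
  exact countItems _ k

lemma foldB_getD (l : List (String × Int)) (d : PySem.Dict String Int) (k : String) :
    (l.foldl (fun d p => if p.2 > 0 then d.modify p.1 0 (· + p.2) else d) d).getD k 0
      = d.getD k 0 + (l.map (fun p => if p.1 = k ∧ 0 < p.2 then p.2 else 0)).sum := by
  induction l generalizing d with
  | nil => simp
  | cons p l ih =>
    simp only [List.foldl_cons, List.map_cons, List.sum_cons]
    by_cases hp : p.2 > 0
    · rw [if_pos hp, ih, PySem.Dict.getD_modify]
      by_cases hk : k = p.1
      · subst hk; simp [hp]; ring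
      · rw [if_neg hk, if_neg (fun hc => hk hc.1.symm)]; ring
    · rw [if_neg hp, ih, if_neg (fun hc => hp hc.2)]; ring

lemma wantedB_getD (want : List String) (number : List Int) (k : String) :
    ((want.zip number).foldl
        (fun d p => if p.2 > 0 then d.modify p.1 0 (· + p.2) else d) PySem.Dict.empty).getD k 0
      = wantedF want number k := by
  rw [foldB_getD]
  simp [wantedF]

lemma getD_of_not_mem_keys (d : PySem.Dict String Int) (k : String) (h : k ∉ d.keys) :
    d.getD k 0 = 0 := by
  rw [PySem.Dict.getD_eq_get?_getD,
    (PySem.Dict.get?_eq_none_iff_not_mem_keys d k).mpr h]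
  rfl

lemma counterEq_iff (d1 d2 : PySem.Dict String Int) :
    counterEq d1 d2 = true ↔ ∀ k, d1.getD k 0 = d2.getD k 0 := by
  constructor
  · intro h k
    simp only [counterEq, Bool.and_eq_true, List.all_eq_true, beq_iff_eq] at h
    by_cases h1 : k ∈ d1.keys
    · exact h.1 k h1
    · by_cases h2 : k ∈ d2.keys
      · exact h.2 k h2
      · rw [getD_of_not_mem_keys _ _ h1, getD_of_not_mem_keys _ _ h2]
  · intro h
    simp only [counterEq, Bool.and_eq_true, List.all_eq_true, beq_iff_eq]
    exact ⟨fun k _ => h k, fun k _ => h k⟩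

lemma foldDiff_getD (f : String → Int) (S : List String) (c0 : PySem.Dict String Int) (k : String) :
    (S.foldl (fun c key => if f key ≠ 0 then c.insert key (f key) else c) c0).getD k 0
      = if k ∈ S ∧ f k ≠ 0 then f k else c0.getD k 0 := by
  induction S generalizing c0 with
  | nil => simp
  | cons s S ih =>
    simp only [List.foldl_cons]
    rw [ih]
    by_cases hS : k ∈ S ∧ f k ≠ 0
    · rw [if_pos hS, if_pos ⟨List.mem_cons_of_mem _ hS.1, hS.2⟩]
    · rw [if_neg hS]
      by_cases hk : k = s
      · subst hk
        by_cases hf : f k ≠ 0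
        · rw [if_pos hf, PySem.Dict.getD_insert_self, if_pos ⟨List.mem_cons_self, hf⟩]
        · rw [if_neg hf, if_neg (fun hc => hf hc.2)]
      · have hcond : ¬ (k ∈ s :: S ∧ f k ≠ 0) := by
          intro hc
          rcases List.mem_cons.mp hc.1 with h | h
          · exact hk h
          · exact hS ⟨h, hc.2⟩
        rw [if_neg hcond]
        by_cases hf : f s ≠ 0
        · rw [if_pos hf, PySem.Dict.getD_insert_of_ne _ _ _ hk]
        · rw [if_neg hf]

lemma foldDiff_mem_keys (f : String → Int) (S : List String) (c0 : PySem.Dict String Int)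
    (k : String) (h : k ∈ (S.foldl (fun c key => if f key ≠ 0 then c.insert key (f key) else c) c0).keys) :
    k ∈ c0.keys ∨ (k ∈ S ∧ f k ≠ 0) := by
  induction S generalizing c0 with
  | nil => exact Or.inl h
  | cons s S ih =>
    simp only [List.foldl_cons] at h
    rcases ih _ h with h' | h'
    · by_cases hf : f s ≠ 0
      · rw [if_pos hf] at h'
        rcases (PySem.Dict.mem_keys_insert _ _ _ _).mp h' with rfl | h''
        · exact Or.inr ⟨List.mem_cons_self, hf⟩
        · exact Or.inl h''
      · rw [if_neg hf] at h'
        exact Or.inl h'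
    · exact Or.inr ⟨List.mem_cons_of_mem _ h'.1, h'.2⟩

lemma foldDiff_nodup (f : String → Int) (S : List String) (c0 : PySem.Dict String Int)
    (h : c0.keys.Nodup) :
    (S.foldl (fun c key => if f key ≠ 0 then c.insert key (f key) else c) c0).keys.Nodup := by
  induction S generalizing c0 with
  | nil => exact h
  | cons s S ih =>
    simp only [List.foldl_cons]
    apply ih
    by_cases hf : f s ≠ 0
    · rw [if_pos hf]; exact PySem.Dict.nodup_keys_insert _ _ _ h
    · rw [if_neg hf]; exact h

lemma dictDiff_getD (a b : PySem.Dict String Int) (k : String) :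
    (dictDiff a b).getD k 0 = a.getD k 0 - b.getD k 0 := by
  have h := foldDiff_getD (fun key => a.getD key 0 - b.getD key 0)
    (PySem.Set.union (PySem.Set.ofList a.keys) b.keys) PySem.Dict.empty k
  unfold dictDiff
  rw [h]
  by_cases hz : a.getD k 0 - b.getD k 0 = 0
  · rw [if_neg (fun hc => hc.2 hz), PySem.Dict.getD_empty]
    omega
  · by_cases hm : k ∈ PySem.Set.union (PySem.Set.ofList a.keys) b.keys
    · rw [if_pos ⟨hm, hz⟩]
    · exfalso
      apply hm
      by_cases ha : k ∈ a.keys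
      · exact (PySem.Set.mem_union _ _ _).mpr (Or.inl ((PySem.Set.mem_ofList _ _).mpr ha))
      · by_cases hb : k ∈ b.keys
        · exact (PySem.Set.mem_union _ _ _).mpr (Or.inr hb)
        · rw [getD_of_not_mem_keys _ _ ha, getD_of_not_mem_keys _ _ hb] at hz
          simp at hz

lemma dictDiff_nonzero (a b : PySem.Dict String Int) :
    ∀ k ∈ (dictDiff a b).keys, (dictDiff a b).getD k 0 ≠ 0 := by
  intro k hk
  rw [dictDiff_getD]
  unfold dictDiff at hk
  rcases foldDiff_mem_keys _ _ _ _ hk with h | h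
  · simp [PySem.Dict.keys, PySem.Dict.empty] at h
  · have h2 := h.2
    have heq := dictDiff_getD a b k
    unfold dictDiff at heq
    exact h2
  

lemma dictDiff_nodup (a b : PySem.Dict String Int) : (dictDiff a b).keys.Nodup := by
  unfold dictDiff
  apply foldDiff_nodup
  simp [PySem.Dict.keys, PySem.Dict.empty]

lemma get?_erase_self (d : PySem.Dict String Int) (k : String) : (d.erase k).get? k = none := by
  rcases d with ⟨l⟩
  simp only [PySem.Dict.erase, PySem.Dict.get?]
  rw [List.find?_eq_none.mpr]
  · rfl
  · intro p hp
    rcases List.mem_filter.mp hp with ⟨_, hq⟩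
    simpa using hq

lemma get?_erase_of_ne (d : PySem.Dict String Int) (k k' : String) (h : k' ≠ k) :
    (d.erase k).get? k' = d.get? k' := by
  rcases d with ⟨l⟩
  simp only [PySem.Dict.erase, PySem.Dict.get?]
  congr 1
  induction l with
  | nil => rfl
  | cons p l ih =>
    by_cases hp : p.1 = k
    · have h1 : (p.1 == k') = false := by rw [hp]; exact beq_eq_false_iff_ne.mpr (fun e => h e.symm)
      have h2 : (p.1 == k) = true := by simp [hp]
      simp [h1, h2, ih]
    · have h2 : (p.1 == k) = false := by simp [hp]
      by_cases hk2 : p.1 = k'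
      · have h1 : (p.1 == k') = true := by simp [hk2]
        simp [h1, h2]
      · have h1 : (p.1 == k') = false := by simp [hk2]
        simp [h1, h2, ih]

lemma keys_erase_sub (d : PySem.Dict String Int) (k k' : String)
    (h : k' ∈ (d.erase k).keys) : k' ∈ d.keys := by
  rcases d with ⟨l⟩
  simp only [PySem.Dict.erase, PySem.Dict.keys, List.mem_map] at h ⊢
  rcases h with ⟨p, hp, rfl⟩
  exact ⟨p, (List.mem_filter.mp hp).1, rfl⟩

lemma nodup_keys_erase (d : PySem.Dict String Int) (k : String) (h : d.keys.Nodup) :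
    (d.erase k).keys.Nodup := by
  rcases d with ⟨l⟩
  simp only [PySem.Dict.erase, PySem.Dict.keys] at h ⊢
  exact h.sublist (List.Sublist.map _ List.filter_sublist)

lemma udv_getD (m : PySem.Dict String Int) (key : String) (v : Int) (k : String) :
    (updateDictValue m key v).getD k 0 = if k = key then m.getD key 0 + v else m.getD k 0 := by
  unfold updateDictValue
  by_cases h0 : (m.modify key 0 (· + v)).getD key 0 = 0
  · rw [if_pos h0]
    by_cases hk : k = key
    · subst hk
      rw [if_pos rfl, PySem.Dict.getD_eq_get?_getD, get?_erase_self]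
      rw [PySem.Dict.getD_modify_self] at h0
      simpa using h0.symm
    · rw [if_neg hk, PySem.Dict.getD_eq_get?_getD, get?_erase_of_ne _ _ _ hk,
        ← PySem.Dict.getD_eq_get?_getD, PySem.Dict.getD_modify, if_neg hk]
  · rw [if_neg h0, PySem.Dict.getD_modify]

lemma udv_nonzero (m : PySem.Dict String Int) (key : String) (v : Int)
    (h : ∀ k ∈ m.keys, m.getD k 0 ≠ 0) :
    ∀ k ∈ (updateDictValue m key v).keys, (updateDictValue m key v).getD k 0 ≠ 0 := by
  intro k hk
  rw [udv_getD]
  unfold updateDictValue at hk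
  by_cases h0 : (m.modify key 0 (· + v)).getD key 0 = 0
  · rw [if_pos h0] at hk
    have hkne : k ≠ key := by
      intro he
      subst he
      have h1 := get?_erase_self (m.modify k 0 (· + v)) k
      exact ((PySem.Dict.get?_eq_none_iff_not_mem_keys _ _).mp h1) hk
    rw [if_neg hkne]
    have hk1 : k ∈ (m.modify key 0 (· + v)).keys := keys_erase_sub _ _ _ hk
    rw [PySem.Dict.keys_modify] at hk1
    rcases (PySem.Dict.mem_keys_insert _ _ _ _).mp hk1 with h2 | h2
    · exact absurd h2 hkne
    · exact h k h2
  · rw [if_neg h0] at hk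
    by_cases hkk : k = key
    · subst hkk
      rw [if_pos rfl]
      rw [PySem.Dict.getD_modify_self] at h0
      exact h0
    · rw [if_neg hkk]
      rw [PySem.Dict.keys_modify] at hk
      rcases (PySem.Dict.mem_keys_insert _ _ _ _).mp hk with h' | h'
      · exact absurd h' hkk
      · exact h k h' 

lemma udv_nodup (m : PySem.Dict String Int) (key : String) (v : Int) (h : m.keys.Nodup) :
    (updateDictValue m key v).keys.Nodup := by
  unfold updateDictValue
  have hm : (m.modify key 0 (· + v)).keys.Nodup := by
    rw [PySem.Dict.keys_modify]
    exact PySem.Dict.nodup_keys_insert _ _ _ h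
  by_cases h0 : (m.modify key 0 (· + v)).getD key 0 = 0
  · rw [if_pos h0]; exact nodup_keys_erase _ _ hm
  · rw [if_neg h0]; exact hm

lemma size_zero_iff (m : PySem.Dict String Int) (hnz : ∀ k ∈ m.keys, m.getD k 0 ≠ 0) :
    m.size = 0 ↔ ∀ k, m.getD k 0 = 0 := by
  constructor
  · intro h k
    have hi : m.items = [] := List.length_eq_zero_iff.mp h
    rw [PySem.Dict.getD_eq_get?_getD]
    simp [PySem.Dict.get?, hi]
  · intro h
    rcases hm : m.items with _ | ⟨p, rest⟩
    · simp [PySem.Dict.size, hm]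
    · exfalso
      have hk : p.1 ∈ m.keys := by simp [PySem.Dict.keys, hm]
      have hv : m.getD p.1 0 = p.2 := by
        rw [PySem.Dict.getD_eq_get?_getD]
        simp [PySem.Dict.get?, hm]
      exact hnz p.1 hk (h p.1)

lemma window_shift (l : List String) (i : Nat) (h1 : 1 ≤ i) (h2 : i + 10 ≤ l.length) (k : String) :
    ((win l i).count k : Int)
      = ((win l (i - 1)).count k : Int)
        - (if l[i - 1]'(by omega) = k then 1 else 0)
        + (if l[i + 9]'(by omega) = k then 1 else 0) := by
  have e1 : win l (i - 1) = l[i - 1]'(by omega) :: (l.drop i).take 9 := by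
    unfold win
    have hd : l.drop (i - 1) = l[i - 1]'(by omega) :: l.drop i := by
      rw [List.drop_eq_getElem_cons (by omega), show i - 1 + 1 = i from by omega]
    rw [hd, show (10 : Nat) = 9 + 1 from rfl, List.take_succ_cons]
  have e2 : win l i = (l.drop i).take 9 ++ [l[i + 9]'(by omega)] := by
    unfold win
    rw [show (10 : Nat) = 9 + 1 from rfl, List.take_add_one]
    congr 1
    have h9 : 9 < (l.drop i).length := by simp; omega
    rw [List.getElem?_eq_getElem h9]
    simp
  rw [e1, e2]
  push_cast [List.count_cons, List.count_append]
  by_cases ho : l[i - 1]'(by omega) = k <;> by_cases hn : l[i + 9]'(by omega) = k <;>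
    simp [ho, hn]

lemma slice_win (discount : List String) (i : Nat) :
    PySem.List.slice discount (some (i : Int)) (some ((i : Int) + 10)) = win discount i := by
  have h := PySem.List.slice_natCast_add discount i 10
  unfold win
  rw [← h]
  norm_num

lemma slice_win0 (discount : List String) :
    PySem.List.slice discount none (some 10) = win discount 0 := by
  rw [PySem.List.slice_to discount (by norm_num)]
  unfold win
  simp

lemma counterEq_win (discount : List String) (i : Nat) (wb : PySem.Dict String Int)
    (W : String → Int) (hwb : ∀ k, wb.getD k 0 = W k) :
    counterEq (PySem.Dict.counter (win discount i)) wb = true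
      ↔ ∀ k, ((win discount i).count k : Int) = W k := by
  rw [counterEq_iff]
  constructor
  · intro h k
    have := h k
    rwa [PySem.Dict.getD_counter, hwb] at this
  · intro h k
    rw [PySem.Dict.getD_counter, hwb]
    exact h k

lemma udv2_getD (m : PySem.Dict String Int) (old nw k : String) :
    (updateDictValue (updateDictValue m old (-1)) nw 1).getD k 0
      = m.getD k 0 - (if old = k then 1 else 0) + (if nw = k then 1 else 0) := by
  by_cases hkn : k = nw
  · by_cases hko : k = old
    · subst hkn; subst hko
      simp [udv_getD]
    · subst hkn
      have hko' : old ≠ k := fun e => hko e.symm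
      simp [udv_getD, hko, hko']
  · by_cases hko : k = old
    · subst hko
      have hkn' : nw ≠ k := fun e => hkn e.symm
      simp [udv_getD, hkn, hkn']
      ring
    · have hko' : old ≠ k := fun e => hko e.symm
      have hkn' : nw ≠ k := fun e => hkn e.symm
      simp [udv_getD, hkn, hko, hkn', hko']

lemma loop_eq (discount : List String) (W : String → Int) (wb : PySem.Dict String Int)
    (hwb : ∀ k, wb.getD k 0 = W k) :
    ∀ (n : Nat) (a : Nat) (m : PySem.Dict String Int) (r : Int), 1 ≤ a →
      (((discount.length : Int) - 9) - a).toNat = n →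
      Good discount W m (a - 1) →
      ((PySem.List.pyRange (a : Int) ((discount.length : Int) - 9) 1).foldl
        (fun (st : Int × PySem.Dict String Int) i =>
          let oldOne := PySem.List.pyGetD discount (i - 1) ""
          let newOne := PySem.List.pyGetD discount (i + 9) ""
          let m := updateDictValue (updateDictValue st.2 oldOne (-1)) newOne 1
          (if m.size = 0 then st.1 + 1 else st.1, m)) (r, m)).1
      = (PySem.List.pyRange (a : Int) ((discount.length : Int) - 9) 1).foldl
        (fun c i =>
          if counterEq (PySem.Dict.counter (PySem.List.slice discount (some i) (some (i + 10)))) wb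
          then c + 1 else c) r := by
  intro n
  induction n with
  | zero =>
    intro a m r ha h0 _
    rw [PySem.List.pyRange_one_eq_nil (by omega)]
    rfl
  | succ n ih =>
    intro a m r ha h0 hg
    have hlt : (a : Int) < (discount.length : Int) - 9 := by omega
    have h10 : a + 10 ≤ discount.length := by omega
    have hold : PySem.List.pyGetD discount ((a : Int) - 1) "" = discount[a - 1]'(by omega) := by
      rw [PySem.List.pyGetD_eq_getElem discount "" (by omega) (by omega)]
      simp only [show ((a : Int) - 1).toNat = a - 1 from by omega]
    have hnew : PySem.List.pyGetD discount ((a : Int) + 9) "" = discount[a + 9]'(by omega) := by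
      rw [PySem.List.pyGetD_eq_getElem discount "" (by omega) (by omega)]
      simp only [show ((a : Int) + 9).toNat = a + 9 from by omega]
    rw [PySem.List.pyRange_one_cons hlt, List.foldl_cons, List.foldl_cons]
    have hg' : Good discount W
        (updateDictValue (updateDictValue m (discount[a - 1]'(by omega)) (-1))
          (discount[a + 9]'(by omega)) 1) a := by
      refine ⟨?_, udv_nonzero _ _ _ (udv_nonzero _ _ _ hg.2.1),
        udv_nodup _ _ _ (udv_nodup _ _ _ hg.2.2)⟩
      intro k
      rw [udv2_getD, hg.1 k, window_shift discount a ha h10 k]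
      ring
    have hcond : ((updateDictValue (updateDictValue m (discount[a - 1]'(by omega)) (-1))
            (discount[a + 9]'(by omega)) 1).size = 0)
        ↔ (counterEq (PySem.Dict.counter
            (PySem.List.slice discount (some (a : Int)) (some ((a : Int) + 10)))) wb = true) := by
      rw [size_zero_iff _ hg'.2.1, slice_win discount a,
        counterEq_win discount a wb W hwb]
      constructor
      · intro h k
        have h1 := hg'.1 k
        have h2 := h k
        omega
      · intro h k
        have h1 := hg'.1 k
        have h2 := h k
        omega
    simp only [hold, hnew]
    have hifs : (if (updateDictValue (updateDictValue m (discount[a - 1]'(by omega)) (-1))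
              (discount[a + 9]'(by omega)) 1).size = 0 then r + 1 else r)
        = (if counterEq (PySem.Dict.counter
            (PySem.List.slice discount (some (a : Int)) (some ((a : Int) + 10)))) wb = true
           then r + 1 else r) := by
      by_cases hc : (updateDictValue (updateDictValue m (discount[a - 1]'(by omega)) (-1))
              (discount[a + 9]'(by omega)) 1).size = 0
      · rw [if_pos hc, if_pos (hcond.mp hc)]
      · rw [if_neg hc, if_neg (fun hcc => hc (hcond.mpr hcc))]
    rw [hifs]
    rw [show ((a : Int) + 1) = ((a + 1 : Nat) : Int) from by push_cast; ring]
    exact ih (a + 1) _ _ (by omega) (by omega) (by simpa using hg')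

-- ===== VERDICT (by name: the statement is the Claim_ definition above) =====
theorem solution_spec : Claim_equal_solution := by
  intro want number discount _
  unfold Spec_solution
  show solution want number discount = solution_alt want number discount
  simp only [solution, solution_alt, PySem.List.len_eq]
  rw [show (discount.length : Int) - 10 + 1 = (discount.length : Int) - 9 from by ring]
  have hwA := wantedA_getD want number
  have hwB := wantedB_getD want number
  set wb := (want.zip number).foldl (fun d p => if p.2 > 0 then d.modify p.1 0 (· + p.2) else d) PySem.Dict.empty with hwbdef
  set wA := PySem.Dict.counter ((want.zip number).foldl (fun acc p => acc ++ List.replicate p.2.toNat p.1) []) with hwAdef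
  set miss := dictDiff (PySem.Dict.counter (PySem.List.slice discount none (some 10))) wA with hmiss
  have hg0 : Good discount (wantedF want number) miss 0 := by
    refine ⟨?_, dictDiff_nonzero _ _, dictDiff_nodup _ _⟩
    intro k
    rw [hmiss, dictDiff_getD, PySem.Dict.getD_counter, hwA k, slice_win0]
  have hiff : (miss.size = 0) ↔ (counterEq (PySem.Dict.counter (PySem.List.slice discount none (some 10))) wb = true) := by
    rw [size_zero_iff _ hg0.2.1, slice_win0, counterEq_win discount 0 wb (wantedF want number) hwB]
    constructor
    · intro h k
      have h1 := hg0.1 k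
      have h2 := h k
      omega
    · intro h k
      have h1 := hg0.1 k
      have h2 := h k
      omega
  have hinit : (if miss.size = 0 then (0 : Int) + 1 else 0)
      = (if counterEq (PySem.Dict.counter (PySem.List.slice discount none (some 10))) wb then 1 else 0) := by
    by_cases hc : miss.size = 0
    · rw [if_pos hc, if_pos (hiff.mp hc)]
      norm_num
    · rw [if_neg hc, if_neg (fun hcc => hc (hiff.mpr hcc))]
  rw [hinit]
  rw [show (1 : Int) = ((1 : Nat) : Int) from by norm_num]
  exact loop_eq discount (wantedF want number) wb hwB ((((discount.length : Int) - 9) - 1).toNat) 1 miss _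
    (le_refl 1) (by omega) (by simpa using hg0)
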